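-- pv_equiv track=rewrite | github.com/ajnieset/advent_of_code_2021 | day1/solution.py | calculate_sums
-- ===== SOURCE A (Python) =====
-- def calculate_sums(depths):
--     set1 = set2 = set3 = None
--     sums_of_depths = []
--
--     for depth in depths:
--         depth = int(depth)
--         set3 = set2
--         set2 = set1
--         set1 = depth
--         if None in [set1, set2, set3]:
--             continue
--
--         depth_sum = set1 + set2 + set3
--         sums_of_depths.append(depth_sum)
--
--     return sums_of_depths
-- ===== SOURCE B (Python) =====
-- def calculate_sums(depths):
--     d = [int(x) for x in depths]
--     return [d[i] + d[i + 1] + d[i + 2] for i in range(len(d) - 2)]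
-- ===== Notes on version B (the rewrite author's own statement) =====
-- stated objective: idiomatic
-- what changed: Replaces the three rolling registers and the None-sentinel check with a direct indexed sliding-window comprehension over range(len(d)-2).
import Mathlib
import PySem

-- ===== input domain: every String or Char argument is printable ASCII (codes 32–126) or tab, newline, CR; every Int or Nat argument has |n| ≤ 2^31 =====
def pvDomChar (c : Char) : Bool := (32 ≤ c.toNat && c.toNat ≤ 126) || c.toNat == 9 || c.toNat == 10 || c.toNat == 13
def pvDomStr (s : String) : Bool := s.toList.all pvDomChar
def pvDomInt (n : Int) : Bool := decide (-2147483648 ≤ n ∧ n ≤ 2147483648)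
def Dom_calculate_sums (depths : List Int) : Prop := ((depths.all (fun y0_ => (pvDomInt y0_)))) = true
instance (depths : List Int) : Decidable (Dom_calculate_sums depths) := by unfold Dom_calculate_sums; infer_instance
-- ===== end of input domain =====

-- B replaces A's three rolling registers and None-sentinel check with a direct
-- indexed sliding-window pass (idiomatic; same cost).

-- ===== PORT A =====
-- one loop iteration of A: state = (set1, set2, set3, sums_of_depths)
def pvStepA (st : Option Int × Option Int × Option Int × List Int) (depth : Int) :
    Option Int × Option Int × Option Int × List Int :=
  let set3 := st.2.1
  let set2 := st.1
  let set1 := some depth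
  -- `if None in [set1, set2, set3]: continue`  (set1 is never none here)
  match set1, set2, set3 with
  | some a, some b, some c => (set1, set2, set3, st.2.2.2 ++ [a + b + c])
  | _, _, _ => (set1, set2, set3, st.2.2.2)

def calculate_sums (depths : List Int) : List Int :=
  (depths.foldl pvStepA (none, none, none, [])).2.2.2

-- ===== PORT B =====
def calculate_sums_alt (depths : List Int) : List Int :=
  (List.range (depths.length - 2)).map
    (fun i => depths.getD i 0 + depths.getD (i + 1) 0 + depths.getD (i + 2) 0)

-- ===== PRECONDITION & SPEC =====
def Spec_calculate_sums (depths : List Int) (out : List Int) : Prop := out = calculate_sums_alt depths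
instance (depths : List Int) (out : List Int) : Decidable (Spec_calculate_sums depths out) := by unfold Spec_calculate_sums; infer_instance

-- ===== CLAIM (what is proved, stated in full; the proofs are below) =====
def Claim_equal_calculate_sums : Prop := ∀ (depths : List Int), Dom_calculate_sums depths → Spec_calculate_sums depths (calculate_sums depths)

-- ===== LEMMAS AND PROOFS =====

-- B unfolds one window at a time
theorem alt_two (a b : Int) : calculate_sums_alt [a, b] = [] := rfl

theorem alt_cons3 (a b c : Int) (l : List Int) :
    calculate_sums_alt (a :: b :: c :: l) = (a + b + c) :: calculate_sums_alt (b :: c :: l) := by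
  simp only [calculate_sums_alt, List.length_cons]
  have h : (l.length + 1 + 1 + 1 - 2) = (l.length + 1 + 1 - 2) + 1 := by omega
  rw [h, List.range_succ_eq_map, List.map_cons, List.map_map]
  rfl

-- A's fold, once the two leading registers are filled, appends the windows of B
theorem foldA_full (l : List Int) (a b : Int) (s3 : Option Int) (acc : List Int) :
    (l.foldl pvStepA (some a, some b, s3, acc)).2.2.2 = acc ++ calculate_sums_alt (b :: a :: l) := by
  induction l generalizing a b s3 acc with
  | nil => simp [alt_two]
  | cons c rest ih =>
    rw [List.foldl_cons]
    show (rest.foldl pvStepA (some c, some a, some b, acc ++ [c + a + b])).2.2.2 = _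
    rw [ih, alt_cons3]
    simp [List.append_assoc]
    ring_nf

-- ===== VERDICT (by name: the statement is the Claim_ definition above) =====
theorem calculate_sums_spec : Claim_equal_calculate_sums := by
  intro depths _
  show calculate_sums depths = calculate_sums_alt depths
  match depths with
  | [] => rfl
  | [a] => rfl
  | a :: b :: rest =>
    show ((a :: b :: rest).foldl pvStepA (none, none, none, [])).2.2.2 = _
    rw [List.foldl_cons, List.foldl_cons]
    show (rest.foldl pvStepA (some b, some a, none, [])).2.2.2 = _
    rw [foldA_full]
    rfl
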